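-- pv_equiv track=rewrite | github.com/raulhigueras/LolaVA | modules/mwiki.py | extraer_busqueda_de_frase
-- ===== SOURCE A (Python) =====
-- def extraer_busqueda_de_frase(frase):
-- 	que_es = False
-- 	busqueda = []
-- 	frase = frase.split(" ")
-- 	for palabra in frase:
-- 		if que_es == True:
-- 			busqueda.append(palabra)
-- 		if palabra == "es" or palabra == "fue":
-- 			que_es = True
-- 	return ' '.join(busqueda)
-- ===== SOURCE B (Python) =====
-- def extraer_busqueda_de_frase(frase):
--     palabras = frase.split(" ")
--     for i, palabra in enumerate(palabras):
--         if palabra in ("es", "fue"):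
--             return ' '.join(palabras[i + 1:])
--     return ''
-- ===== Notes on version B (the rewrite author's own statement) =====
-- stated objective: simpler
-- what changed: B replaces the boolean-flag accumulation loop by locating the index of the first marker word (es or fue) and returning the joined suffix slice after it, with an early return and empty-string fallback.
import Mathlib
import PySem

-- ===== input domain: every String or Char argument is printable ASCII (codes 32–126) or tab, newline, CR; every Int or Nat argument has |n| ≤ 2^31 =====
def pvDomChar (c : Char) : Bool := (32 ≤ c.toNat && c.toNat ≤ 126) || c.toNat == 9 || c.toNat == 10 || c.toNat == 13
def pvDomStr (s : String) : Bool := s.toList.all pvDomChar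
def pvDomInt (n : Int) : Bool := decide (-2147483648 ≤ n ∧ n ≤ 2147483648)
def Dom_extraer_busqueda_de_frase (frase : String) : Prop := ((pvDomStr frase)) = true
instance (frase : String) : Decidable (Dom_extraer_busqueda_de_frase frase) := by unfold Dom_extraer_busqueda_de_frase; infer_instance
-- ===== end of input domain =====

-- B replaces A's boolean-flag accumulation loop by "find the index of the first 'es'/'fue'
-- marker and join the suffix after it" (objective: simpler).

-- ===== PORT A =====
-- one loop step of A: maybe append the word, then maybe set the flag
def pvStepA (st : Bool × List String) (palabra : String) : Bool × List String :=
  let busqueda := if st.1 = true then st.2 ++ [palabra] else st.2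
  let que_es := if palabra = "es" ∨ palabra = "fue" then true else st.1
  (que_es, busqueda)

def extraer_busqueda_de_frase (frase : String) : String :=
  let fraseL := (PySem.Str.split? frase " ").getD []   -- sep " " ≠ "": split? is always some
  let st := fraseL.foldl pvStepA (false, [])
  PySem.Str.join " " st.2

-- ===== PORT B =====
def extraer_busqueda_de_frase_alt (frase : String) : String :=
  let palabras := (PySem.Str.split? frase " ").getD []
  match palabras.findIdx? (fun p => p == "es" || p == "fue") with
  | some i => PySem.Str.join " " (palabras.drop (i + 1))   -- palabras[i+1:]
  | none => ""

-- ===== PRECONDITION & SPEC =====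
def Spec_extraer_busqueda_de_frase (frase : String) (out : String) : Prop := out = extraer_busqueda_de_frase_alt frase
instance (frase : String) (out : String) : Decidable (Spec_extraer_busqueda_de_frase frase out) := by unfold Spec_extraer_busqueda_de_frase; infer_instance

-- ===== CLAIM (what is proved, stated in full; the proofs are below) =====
def Claim_equal_extraer_busqueda_de_frase : Prop := ∀ (frase : String), Dom_extraer_busqueda_de_frase frase → Spec_extraer_busqueda_de_frase frase (extraer_busqueda_de_frase frase)

-- ===== LEMMAS AND PROOFS =====

-- once the flag is set, A appends every remaining word
theorem pvFold_true (ws : List String) (acc : List String) :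
    (ws.foldl pvStepA (true, acc)).2 = acc ++ ws := by
  induction ws generalizing acc with
  | nil => simp
  | cons p ws ih =>
      simp only [List.foldl_cons, pvStepA]
      split <;> simpa using ih (acc ++ [p])

-- with the flag unset, A collects exactly the suffix after the first marker
theorem pvFold_false (ws : List String) :
    (ws.foldl pvStepA (false, [])).2 =
      match ws.findIdx? (fun p => p == "es" || p == "fue") with
      | some i => ws.drop (i + 1)
      | none => [] := by
  induction ws with
  | nil => simp
  | cons p ws ih =>
      rw [List.findIdx?_cons]
      by_cases hp : p = "es" ∨ p = "fue"
      · have hb : (p == "es" || p == "fue") = true := by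
          rcases hp with h | h <;> simp [h]
        simp only [List.foldl_cons, pvStepA, Bool.false_eq_true, if_false, if_pos hp, hb]
        simpa using pvFold_true ws []
      · have hb : (p == "es" || p == "fue") = false := by
          simp only [Bool.or_eq_false_iff, beq_eq_false_iff_ne]
          exact ⟨fun h => hp (Or.inl h), fun h => hp (Or.inr h)⟩
        simp only [List.foldl_cons, pvStepA, Bool.false_eq_true, if_false, if_neg hp, hb]
        rw [ih]
        cases h : ws.findIdx? (fun p => p == "es" || p == "fue") <;> simp

theorem pvJoin_nil : PySem.Str.join " " [] = "" := by decide

-- ===== VERDICT (by name: the statement is the Claim_ definition above) =====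
theorem extraer_busqueda_de_frase_spec : Claim_equal_extraer_busqueda_de_frase := by
  intro frase _
  unfold Spec_extraer_busqueda_de_frase extraer_busqueda_de_frase extraer_busqueda_de_frase_alt
  simp only
  rw [pvFold_false]
  cases h : ((PySem.Str.split? frase " ").getD []).findIdx? (fun p => p == "es" || p == "fue") <;>
    simp [pvJoin_nil]
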